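-- pv_equiv track=rewrite | github.com/Dend0x/MUNI_FI | ib111/12/12/p6_composite.py | highly_composite
-- ===== SOURCE A (Python) =====
-- from math import isqrt
--
-- def dividors(num: int) -> int:
--     count = 0
--
--     for i in range(1, isqrt(num) + 1):
--         if num % i == 0:
--             if i ** 2 != num:
--                 count += 1
--             count += 1
--
--     return count
--
-- def highly_composite(numbers: set[int]) -> set[int]:
--     nums = sorted(numbers)
--     biggest = 0
--     result: set[int] = set()
--
--     for num in nums:
--         divs_num = dividors(num)
--         if biggest >= divs_num:
--             continue
--         result.add(num)
--         biggest = divs_num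
--
--     return result
-- ===== SOURCE B (Python) =====
-- from math import isqrt
--
--
-- def dividors(num: int) -> int:
--     # number of divisors via prime factorization: d(p1^e1 * ... * pk^ek) = prod (ei + 1)
--     if num == 0:
--         return 0
--     n = num
--     total = 1
--     p = 2
--     while p * p <= n:
--         if n % p == 0:
--             e = 0
--             while n % p == 0:
--                 n //= p
--                 e += 1
--             total *= e + 1
--         p += 1
--     if n > 1:
--         total *= 2  # one prime factor > sqrt remains
--     return total
--
--
-- def highly_composite(numbers: set[int]) -> set[int]:
--     result: set[int] = set()
--     biggest = 0
--     for num in sorted(numbers):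
--         divs = dividors(num)
--         if divs > biggest:
--             result.add(num)
--             biggest = divs
--     return result
-- ===== Notes on version B (the rewrite author's own statement) =====
-- stated objective: alternative
-- what changed: The divisor count is computed by trial-division prime factorization (multiply (exponent+1) for each prime divided out, times 2 for a leftover prime cofactor) instead of A's pairwise divisor counting over every i up to isqrt(num); the sort + running-maximum outer loop is kept.
import Mathlib
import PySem

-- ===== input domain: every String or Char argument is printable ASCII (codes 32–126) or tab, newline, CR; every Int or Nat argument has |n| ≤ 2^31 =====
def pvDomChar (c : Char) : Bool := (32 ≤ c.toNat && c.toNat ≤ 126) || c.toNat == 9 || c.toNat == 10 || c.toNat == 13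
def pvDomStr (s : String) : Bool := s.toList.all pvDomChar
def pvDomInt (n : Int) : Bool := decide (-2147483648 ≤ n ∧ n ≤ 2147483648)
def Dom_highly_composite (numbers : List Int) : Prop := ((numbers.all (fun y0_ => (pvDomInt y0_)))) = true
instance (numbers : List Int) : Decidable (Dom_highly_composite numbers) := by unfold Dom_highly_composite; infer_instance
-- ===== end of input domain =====

-- B computes the divisor count by trial-division prime factorization (product of exponent+1,
-- doubled for a leftover prime cofactor) instead of A's pairwise counting over all i ≤ isqrt(num).

-- ===== PORT A =====
-- math.isqrt(num) = Nat.sqrt num.toNat for 0 ≤ num (exact there); isqrt raises ValueError on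
-- negative input — those inputs are excluded by Pre_highly_composite.
def pyIsqrt (num : Int) : Int := (Nat.sqrt num.toNat : Int)

def dividors (num : Int) : Int :=
  (PySem.List.pyRange 1 (pyIsqrt num + 1) 1).foldl
    (fun count i =>
      if PySem.Int.mod num i = 0 then
        (if i ^ 2 ≠ num then count + 1 else count) + 1
      else count) 0

def highly_composite (numbers : List Int) : List Int :=
  let nums := PySem.List.sorted numbers (fun x => x) false
  (nums.foldl
    (fun (st : Int × PySem.Set Int) num =>
      let divs := dividors num
      if st.1 ≥ divs then st
      else (divs, PySem.Set.add st.2 num))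
    (0, PySem.Set.empty)).2

-- ===== PORT B =====
-- `while n % p == 0: n //= p; e += 1`. The fuel argument is a totality guard only: each
-- division shrinks n, so fuel = n.toNat (what every call passes) is never exhausted.
def stripFactor (fuel : Nat) (p n e : Int) : Int × Int :=
  match fuel with
  | 0 => (n, e)
  | f + 1 =>
    if PySem.Int.mod n p = 0 then stripFactor f p (PySem.Int.floordiv n p) (e + 1)
    else (n, e)

-- `while p * p <= n:` — fuel is a totality guard only: p grows past √n within n.toNat + 1 steps.
def divisorLoop (fuel : Nat) (p n total : Int) : Int × Int :=
  match fuel with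
  | 0 => (n, total)
  | f + 1 =>
    if p * p ≤ n then
      if PySem.Int.mod n p = 0 then
        let s := stripFactor n.toNat p n 0
        divisorLoop f (p + 1) s.1 (total * (s.2 + 1))
      else divisorLoop f (p + 1) n total
    else (n, total)

def dividors_alt (num : Int) : Int :=
  if num = 0 then 0
  else
    let s := divisorLoop (num.toNat + 1) 2 num 1
    if 1 < s.1 then s.2 * 2 else s.2

def highly_composite_alt (numbers : List Int) : List Int :=
  ((PySem.List.sorted numbers (fun x => x) false).foldl
    (fun (st : PySem.Set Int × Int) num =>
      let divs := dividors_alt num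
      if divs > st.2 then (PySem.Set.add st.1 num, divs) else st)
    (PySem.Set.empty, 0)).1

-- ===== PRECONDITION & SPEC =====
-- math.isqrt raises ValueError on negative input, so A raises whenever the set contains a
-- negative number; exactly those inputs are excluded.
def Pre_highly_composite (numbers : List Int) : Prop := ∀ n ∈ numbers, 0 ≤ n
instance (numbers : List Int) : Decidable (Pre_highly_composite numbers) := by
  unfold Pre_highly_composite; infer_instance
def pvWitness_highly_composite : List Int := [12, 7, 0, 36, 2147483648]
def Spec_highly_composite (numbers : List Int) (out : List Int) : Prop := out = highly_composite_alt numbers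
instance (numbers : List Int) (out : List Int) : Decidable (Spec_highly_composite numbers out) := by unfold Spec_highly_composite; infer_instance

-- ===== CLAIM (what is proved, stated in full; the proofs are below) =====
def Claim_equal_highly_composite : Prop := ∀ (numbers : List Int), Dom_highly_composite numbers → Pre_highly_composite numbers → Spec_highly_composite numbers (highly_composite numbers)

-- ===== LEMMAS AND PROOFS =====

-- A-side: the divisor-pair count over 1 ≤ j ≤ √N is the number of divisors of N.
theorem sum_sqrt_eq_card_divisors (N : ℕ) (hN : 1 ≤ N) :
    ∑ j ∈ Finset.Icc 1 (Nat.sqrt N), (if j ∣ N then (if j ^ 2 = N then 1 else 2) else 0)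
      = N.divisors.card := by
  set s := Nat.sqrt N with hs
  have hsplit : ∀ j : ℕ, (if j ∣ N then (if j ^ 2 = N then 1 else 2) else 0)
      = (if j ∣ N then 1 else 0) + (if j ∣ N ∧ j ^ 2 ≠ N then 1 else 0) := by
    intro j; by_cases h1 : j ∣ N <;> by_cases h2 : j ^ 2 = N <;> simp [h1, h2]
  rw [Finset.sum_congr rfl (fun j _ => hsplit j), Finset.sum_add_distrib,
    ← Finset.card_filter, ← Finset.card_filter]
  have e1 : Finset.filter (fun j => j ∣ N) (Finset.Icc 1 s) = Finset.filter (fun d => d ≤ s) N.divisors := by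
    ext d
    simp only [Finset.mem_filter, Finset.mem_Icc, Nat.mem_divisors]
    constructor
    · rintro ⟨⟨h1, h2⟩, h3⟩; exact ⟨⟨h3, by omega⟩, h2⟩
    · rintro ⟨⟨h1, h2⟩, h3⟩
      exact ⟨⟨Nat.pos_of_dvd_of_pos h1 (by omega), h3⟩, h1⟩
  have e2 : (Finset.filter (fun j => j ∣ N ∧ j ^ 2 ≠ N) (Finset.Icc 1 s)).card
      = (Finset.filter (fun d => ¬ d ≤ s) N.divisors).card := by
    symm
    apply Finset.card_nbij (i := fun d => N / d)
    · -- MapsTo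
      intro d hd
      simp only [Finset.mem_coe, Finset.mem_filter, Nat.mem_divisors] at hd
      obtain ⟨⟨hdvd, _⟩, hgt⟩ := hd
      push Not at hgt
      have hd0 : 0 < d := by omega
      have h1 : 1 ≤ N / d := (Nat.one_le_div_iff hd0).mpr (Nat.le_of_dvd (by omega) hdvd)
      have h2 : N / d ≤ s := by
        have : N / d < s + 1 := by
          rw [Nat.div_lt_iff_lt_mul hd0]
          calc N < (s+1) * (s+1) := by simpa [hs] using Nat.lt_succ_sqrt N
          _ ≤ (s+1) * d := Nat.mul_le_mul_left _ hgt
        omega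
      simp only [Finset.mem_coe, Finset.mem_filter, Finset.mem_Icc]
      refine ⟨⟨h1, h2⟩, Nat.div_dvd_of_dvd hdvd, ?_⟩
      intro hsq
      have hss : s * s ≤ N := by simpa [hs] using Nat.sqrt_le N
      have hNe : N = s * s := by nlinarith [Nat.mul_le_mul h2 h2]
      have hds : N / d = s := by nlinarith [Nat.mul_le_mul h2 h2]
      have hNs : N / s = d := by
        have := Nat.div_div_self hdvd (by omega : N ≠ 0)
        rwa [hds] at this
      have hs0 : 0 < s := by nlinarith
      rw [hNe, Nat.mul_div_cancel_left _ hs0] at hNs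
      omega
    · -- InjOn
      intro a ha b hb hab
      have hab' : N / a = N / b := hab
      simp only [Finset.mem_coe, Finset.mem_filter, Nat.mem_divisors] at ha hb
      have := Nat.div_div_self ha.1.1 (by omega : N ≠ 0)
      rw [hab', Nat.div_div_self hb.1.1 (by omega : N ≠ 0)] at this
      omega
    · -- SurjOn
      intro j hj
      simp only [Finset.mem_coe, Finset.mem_filter, Finset.mem_Icc] at hj
      obtain ⟨⟨hj1, hj2⟩, hjd, hjsq⟩ := hj
      refine ⟨N / j, ?_, Nat.div_div_self hjd (by omega)⟩
      simp only [Finset.mem_coe, Finset.mem_filter, Nat.mem_divisors]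
      refine ⟨⟨Nat.div_dvd_of_dvd hjd, by omega⟩, ?_⟩
      intro hle
      have hss : s * s ≤ N := by simpa [hs] using Nat.sqrt_le N
      have hmul : N / j * j = N := Nat.div_mul_cancel hjd
      have hNe : N = s * s := by nlinarith [Nat.mul_le_mul hle hj2]
      have h1 : j = s := by nlinarith [Nat.mul_le_mul_left s hj2, Nat.mul_le_mul_right j hle]
      exact hjsq (by rw [h1, pow_two, hNe])
  rw [e1, e2]
  exact Finset.card_filter_add_card_filter_not (fun d => d ≤ s)

-- Port A's fold as a sum over Finset.Icc 1 √N.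
theorem dividors_eq_sum (num : Int) (h : 1 ≤ num) :
    dividors num = ∑ j ∈ Finset.Icc 1 (Nat.sqrt num.toNat),
      ((if j ∣ num.toNat then (if j ^ 2 = num.toNat then 1 else 2) else 0 : ℕ) : ℤ) := by
  obtain ⟨N, hN⟩ : ∃ N : ℕ, num = (N : Int) := ⟨num.toNat, by omega⟩
  subst hN
  unfold dividors pyIsqrt
  have hfun : (fun (count : ℤ) (i : ℤ) =>
      if PySem.Int.mod (N : ℤ) i = 0 then
        (if i ^ 2 ≠ (N : ℤ) then count + 1 else count) + 1
      else count)
      = (fun count i => count +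
          (if i ∣ (N : ℤ) then (if i ^ 2 = (N : ℤ) then 1 else 2) else 0)) := by
    funext c i
    simp only [PySem.Int.mod_eq_zero_iff_dvd]
    by_cases h1 : i ∣ (N : ℤ) <;> by_cases h2 : i ^ 2 = (N : ℤ) <;> (simp [h1, h2]; try ring)
  rw [hfun, PySem.List.foldl_add, PySem.List.pyRange_one]
  simp only [Int.toNat_natCast, zero_add]
  rw [show ((N.sqrt : ℤ) + 1 - 1).toNat = N.sqrt by omega]
  have hlist : ∀ (n : ℕ) (f : ℕ → ℤ), ((List.range n).map f).sum = ∑ k ∈ Finset.range n, f k :=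
    fun n f => rfl
  rw [List.map_map, hlist]
  rw [show Finset.Icc 1 N.sqrt = Finset.Ico 1 (N.sqrt + 1) by
        ext x; simp only [Finset.mem_Ico, Finset.mem_Icc]; omega,
    Finset.sum_Ico_eq_sum_range]
  simp only [Function.comp_apply]
  apply Finset.sum_congr rfl
  intro k _
  norm_cast

theorem dividors_eq_card (num : Int) (h : 1 ≤ num) :
    dividors num = (num.toNat.divisors.card : Int) := by
  rw [dividors_eq_sum num h, ← Nat.cast_sum,
    sum_sqrt_eq_card_divisors num.toNat (by omega)]

-- B-side: trial division is exhaustive below p², so the remaining cofactor is 1 or prime.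
theorem stripFactor_spec (fuel : ℕ) : ∀ (p n e : Int), n.toNat ≤ fuel → 2 ≤ p → 1 ≤ n →
    ∃ (k : ℕ) (n' : Int), stripFactor fuel p n e = (n', e + k) ∧ n = p ^ k * n' ∧ ¬ p ∣ n' ∧ 1 ≤ n' := by
  induction fuel with
  | zero => intro p n e hM hp hn; omega
  | succ M ih =>
    intro p n e hM hp hn
    by_cases hm : PySem.Int.mod n p = 0
    · have hd : p ∣ n := (PySem.Int.mod_eq_zero_iff_dvd n p).mp hm
      have h2 : PySem.Int.floordiv n p = n / p := PySem.Int.floordiv_eq_ediv_of_pos (by omega)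
      have hpn : p ≤ n := Int.le_of_dvd (by omega) hd
      have h1 : 1 ≤ n / p := by rw [Int.le_ediv_iff_mul_le (by omega)]; omega
      have h3 : n / p < n := by apply Int.ediv_lt_of_lt_mul (by omega); nlinarith
      obtain ⟨k, n', heq, hfact, hnd, hn1⟩ := ih p (n / p) (e + 1) (by omega) hp h1
      refine ⟨k + 1, n', ?_, ?_, hnd, hn1⟩
      · rw [stripFactor, if_pos hm, h2, heq]
        congr 1
        push_cast; ring
      · have : p * (n / p) = n := Int.mul_ediv_cancel' hd
        rw [← this, hfact]; ring
    · refine ⟨0, n, ?_, by ring, fun hd => hm ((PySem.Int.mod_eq_zero_iff_dvd n p).mpr hd), hn⟩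
      rw [stripFactor, if_neg hm]
      simp

theorem small_factor_prime (n p : Int) (hp : 2 ≤ p) (hn : 1 ≤ n) (hlt : n < p * p)
    (hfac : ∀ q : ℕ, q.Prime → (q : Int) ∣ n → p ≤ (q : Int)) :
    n = 1 ∨ n.toNat.Prime := by
  have hmn : (n.toNat : Int) = n := by omega
  have hPp : (p.toNat : Int) = p := by omega
  have hltN : n.toNat < p.toNat * p.toNat := by
    have h := hlt
    rw [← hmn, ← hPp] at h
    exact_mod_cast h
  by_cases hm1 : n.toNat = 1
  · left; omega
  · right
    set m := n.toNat with hm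
    set P := p.toNat with hPdef
    have hq : m.minFac.Prime := Nat.minFac_prime hm1
    have hqd : m.minFac ∣ m := Nat.minFac_dvd m
    have hqdZ : ((m.minFac : ℕ) : Int) ∣ n := by
      rw [← hmn]; exact_mod_cast Int.natCast_dvd_natCast.mpr hqd
    have hPq : P ≤ m.minFac := by
      have := hfac m.minFac hq hqdZ
      omega
    have hdiv1 : m / m.minFac = 1 := by
      by_contra hne
      have hm0 : 0 < m := by omega
      have h1 : 1 ≤ m / m.minFac := (Nat.one_le_div_iff hq.pos).mpr (Nat.le_of_dvd hm0 hqd)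
      have h2 : 2 ≤ m / m.minFac := by omega
      have hq' : (m / m.minFac).minFac.Prime := Nat.minFac_prime (by omega)
      have hq'd : (m / m.minFac).minFac ∣ m :=
        dvd_trans (Nat.minFac_dvd _) (Nat.div_dvd_of_dvd hqd)
      have hq'dZ : (((m / m.minFac).minFac : ℕ) : Int) ∣ n := by
        rw [← hmn]; exact_mod_cast Int.natCast_dvd_natCast.mpr hq'd
      have hPq' : P ≤ (m / m.minFac).minFac := by
        have := hfac _ hq' hq'dZ
        omega
      have hle : (m / m.minFac).minFac ≤ m / m.minFac := Nat.minFac_le (by omega)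
      have : P * m.minFac ≤ (m / m.minFac) * m.minFac :=
        Nat.mul_le_mul_right _ (le_trans hPq' hle)
      rw [Nat.div_mul_cancel hqd] at this
      nlinarith
    have : m = m.minFac := by
      have := Nat.div_mul_cancel hqd
      rw [hdiv1, one_mul] at this
      omega
    rw [this]; exact hq

theorem divisorLoop_post (n total : Int) (hp2 : ∃ p : Int, 2 ≤ p ∧ n < p * p ∧
      (∀ q : ℕ, q.Prime → (q : Int) ∣ n → p ≤ (q : Int))) (hn : 1 ≤ n) :
    (if 1 < n then total * 2 else total) = total * (n.toNat.divisors.card : ℤ) := by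
  obtain ⟨p, hp, hlt, hfac⟩ := hp2
  rcases small_factor_prime n p hp hn hlt hfac with h1 | hpr
  · subst h1
    norm_num [Nat.divisors_one]
  · have h2 : 2 ≤ n.toNat := hpr.two_le
    rw [if_pos (by omega : (1:ℤ) < n)]
    rw [Nat.Prime.divisors hpr, Finset.card_pair (by omega : 1 ≠ n.toNat)]
    push_cast; ring

theorem divisorLoop_spec (fuel : ℕ) : ∀ (p n total : Int), 2 ≤ p → 1 ≤ n →
    n.toNat + 1 - p.toNat ≤ fuel →
    (∀ q : ℕ, q.Prime → (q : Int) ∣ n → p ≤ (q : Int)) →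
    (if 1 < (divisorLoop fuel p n total).1 then (divisorLoop fuel p n total).2 * 2
      else (divisorLoop fuel p n total).2) = total * (n.toNat.divisors.card : ℤ) := by
  induction fuel with
  | zero =>
    intro p n total hp hn hM hfac
    have hlt : n < p * p := by nlinarith [show n < p by omega]
    exact divisorLoop_post n total ⟨p, hp, hlt, hfac⟩ hn
  | succ M ih =>
    intro p n total hp hn hM hfac
    by_cases hg : p * p ≤ n
    · rw [divisorLoop, if_pos hg]
      have hn1 : (1:Int) ≤ n := hn
      by_cases hm : PySem.Int.mod n p = 0
      · rw [if_pos hm]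
        have hd : p ∣ n := (PySem.Int.mod_eq_zero_iff_dvd n p).mp hm
        -- p is prime here: its least prime factor divides n, hence is ≥ p
        have hPp : (p.toNat : Int) = p := by omega
        have hP : p.toNat.Prime := by
          have hr : p.toNat.minFac.Prime := Nat.minFac_prime (by omega)
          have hrd : (p.toNat.minFac : Int) ∣ n := by
            refine dvd_trans ?_ hd
            rw [← hPp]
            exact_mod_cast Int.natCast_dvd_natCast.mpr (Nat.minFac_dvd _)
          have h1 := hfac _ hr hrd
          have h2 : p.toNat.minFac ≤ p.toNat := Nat.minFac_le (by omega)
          have : p.toNat.minFac = p.toNat := by omega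
          rw [← this]; exact hr
        obtain ⟨k, n', heq, hfact, hnd, hn'1⟩ := stripFactor_spec n.toNat p n 0 le_rfl hp hn
        have hk1 : 1 ≤ k := by
          rcases Nat.eq_zero_or_pos k with h0 | h1
          · exfalso; apply hnd; rw [h0, pow_zero, one_mul] at hfact; rw [← hfact]; exact hd
          · exact h1
        have hpk : (1:ℤ) ≤ p ^ k := one_le_pow₀ (by omega)
        have hn'len : n' ≤ n := by nlinarith
        have hpn : p ≤ n := le_trans (by nlinarith) hg
        have hmeas : n'.toNat + 1 - (p + 1).toNat ≤ M := by omega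
        have hfac' : ∀ q : ℕ, q.Prime → (q : Int) ∣ n' → p + 1 ≤ (q : Int) := by
          intro q hq hqd
          have hqn : (q : Int) ∣ n := hqd.trans (Dvd.intro_left _ hfact.symm)
          have h1 := hfac q hq hqn
          have h2 : (q : Int) ≠ p := by
            intro hqp
            exact hnd (by rw [← hqp]; exact hqd)
          omega
        rw [heq]
        have hih := ih (p + 1) n' (total * (0 + (k : ℤ) + 1)) (by omega) hn'1 hmeas hfac'
        simp only at hih ⊢
        rw [hih]
        -- d(n) = (k+1) * d(n')
        have hmn : n.toNat = p.toNat ^ k * n'.toNat := by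
          have : ((p.toNat ^ k * n'.toNat : ℕ) : Int) = n := by
            push_cast
            rw [hPp, show ((n'.toNat : ℕ) : Int) = n' by omega]
            exact hfact.symm
          omega
        have hndN : ¬ p.toNat ∣ n'.toNat := by
          intro hc
          apply hnd
          have : ((p.toNat : ℕ) : Int) ∣ ((n'.toNat : ℕ) : Int) := Int.natCast_dvd_natCast.mpr hc
          rwa [hPp, show ((n'.toNat : ℕ) : Int) = n' by omega] at this
        have hcop : (p.toNat ^ k).Coprime n'.toNat :=
          ((Nat.Prime.coprime_iff_not_dvd hP).mpr hndN).pow_left k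
        have hcard : n.toNat.divisors.card = (k + 1) * n'.toNat.divisors.card := by
          rw [hmn, Nat.Coprime.card_divisors_mul hcop]
          congr 1
          rw [Nat.divisors_prime_pow hP k, Finset.card_map, Finset.card_range]
        rw [hcard]; push_cast; ring
      · rw [if_neg hm]
        have hpd : ¬ p ∣ n := fun hc => hm ((PySem.Int.mod_eq_zero_iff_dvd n p).mpr hc)
        have hpn : p ≤ n := le_trans (by nlinarith) hg
        apply ih (p + 1) n total (by omega) hn (by omega)
        intro q hq hqd
        have h1 := hfac q hq hqd
        have h2 : (q : Int) ≠ p := fun hqp => hpd (by rw [← hqp]; exact hqd)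
        omega
    · rw [divisorLoop, if_neg hg]
      exact divisorLoop_post n total ⟨p, hp, by omega, hfac⟩ hn

theorem dividors_alt_eq_card (num : Int) (h : 1 ≤ num) :
    dividors_alt num = (num.toNat.divisors.card : Int) := by
  unfold dividors_alt
  rw [if_neg (by omega : ¬ num = 0)]
  have hspec := divisorLoop_spec (num.toNat + 1) 2 num 1 (by omega) h (by omega)
    (fun q hq _ => by exact_mod_cast hq.two_le)
  simp only at hspec ⊢
  rw [hspec, one_mul]

theorem dividors_agree (num : Int) (h : 0 ≤ num) : dividors num = dividors_alt num := by
  rcases lt_or_eq_of_le h with h1 | h1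
  · rw [dividors_eq_card num (by omega), dividors_alt_eq_card num (by omega)]
  · rw [← h1]; decide

theorem fold_agree (l : List Int) (hl : ∀ x ∈ l, 0 ≤ x) (b : Int) (r : PySem.Set Int) :
    (l.foldl (fun (st : Int × PySem.Set Int) num =>
        let divs := dividors num
        if st.1 ≥ divs then st else (divs, PySem.Set.add st.2 num)) (b, r)).2
    = (l.foldl (fun (st : PySem.Set Int × Int) num =>
        let divs := dividors_alt num
        if divs > st.2 then (PySem.Set.add st.1 num, divs) else st) (r, b)).1 := by
  induction l generalizing b r with
  | nil => rfl
  | cons x l ih =>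
    have hx : dividors x = dividors_alt x := dividors_agree x (hl x (by simp))
    have hl2 : ∀ y ∈ l, 0 ≤ y := fun y hy => hl y (List.mem_cons_of_mem _ hy)
    simp only [List.foldl_cons, hx]
    by_cases hc : dividors_alt x > b
    · simp only [if_pos hc, if_neg (by omega : ¬ b ≥ dividors_alt x)]
      exact ih hl2 _ _
    · simp only [if_neg hc, if_pos (by omega : b ≥ dividors_alt x)]
      exact ih hl2 _ _

-- ===== VERDICT (by name: the statement is the Claim_ definition above) =====
theorem highly_composite_spec : Claim_equal_highly_composite := by
  intro numbers _ hpre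
  unfold Spec_highly_composite highly_composite highly_composite_alt
  exact fold_agree _ (fun x hx => hpre x ((PySem.List.mem_sorted _ _ _ _).mp hx)) 0 PySem.Set.empty
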